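-- pv_equiv track=rewrite | github.com/OctipusPrime/Book_recommendation_system | functions.py | limit_id_to_entry_to_review_matches
-- ===== SOURCE A (Python) =====
-- def limit_id_to_entry_to_review_matches(id_to_book_original, keywords):
--     id_to_book_new = {}
--     for word in keywords:
--         for book in keywords[word]:
--             if book not in id_to_book_new.keys():
--                 try:
--                     id_to_book_new[book] = id_to_book_original[book]
--                 except:
--                     continue
--     return id_to_book_new
-- ===== SOURCE B (Python) =====
-- def limit_id_to_entry_to_review_matches(id_to_book_original, keywords):
--     flat = [book for books in keywords.values() for book in books]
--     first_pos = {}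
--     for pos, book in enumerate(flat):
--         first_pos.setdefault(book, pos)
--     kept = [(book, entry) for book, entry in id_to_book_original.items()
--             if book in first_pos]
--     kept.sort(key=lambda item: first_pos[item[0]])
--     return dict(kept)
-- ===== Notes on version B (the rewrite author's own statement) =====
-- stated objective: alternative
-- what changed: B inverts the traversal axis: it builds a first-occurrence index of the keyword-matched books (enumerate + setdefault), then scans the ORIGINAL dict once keeping books present in that index, and sorts the kept pairs by first-occurrence position to restore A's encounter order, instead of A's nested keyword loops with a membership test on the growing result dict and try/except per lookup.
import Mathlib
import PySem

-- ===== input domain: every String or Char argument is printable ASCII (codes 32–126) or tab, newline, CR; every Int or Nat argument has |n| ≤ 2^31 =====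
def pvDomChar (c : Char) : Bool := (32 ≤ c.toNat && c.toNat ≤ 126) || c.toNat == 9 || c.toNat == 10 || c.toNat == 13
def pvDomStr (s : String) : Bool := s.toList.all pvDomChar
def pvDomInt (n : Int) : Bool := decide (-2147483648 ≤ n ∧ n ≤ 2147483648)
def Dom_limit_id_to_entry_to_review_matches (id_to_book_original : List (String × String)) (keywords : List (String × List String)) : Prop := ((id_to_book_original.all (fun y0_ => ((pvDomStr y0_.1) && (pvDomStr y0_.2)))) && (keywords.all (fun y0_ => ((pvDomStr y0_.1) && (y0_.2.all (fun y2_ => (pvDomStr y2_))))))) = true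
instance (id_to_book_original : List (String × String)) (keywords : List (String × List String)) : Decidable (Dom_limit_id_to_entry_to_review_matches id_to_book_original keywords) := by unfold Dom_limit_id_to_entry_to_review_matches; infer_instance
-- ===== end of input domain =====

-- B inverts the traversal axis: first-occurrence index of the keyword books, one scan of the
-- ORIGINAL dict keeping indexed books, then a sort by first-occurrence position (alternative, same cost).


-- ===== PORT A =====
-- literal port of A: both dict arguments enter as Python dicts (PySem.Dict.ofList);
-- 'for word in keywords' iterates the keys, 'keywords[word]' is the lookup (the none
-- branch is unreachable since word comes from the keys), 'book not in id_to_book_new.keys()'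
-- is the contains test, and the try/except around 'id_to_book_original[book]' is the
-- match on get? (none = KeyError = continue).
def limit_id_to_entry_to_review_matches (id_to_book_original : List (String × String)) (keywords : List (String × List String)) : List (String × String) :=
  let orig := PySem.Dict.ofList id_to_book_original
  let kw := PySem.Dict.ofList keywords
  (kw.keys.foldl (fun d word =>
      match kw.get? word with
      | some books =>
          books.foldl (fun d book =>
            if d.contains book then d
            else
              match orig.get? book with
              | some v => d.insert book v
              | none => d) d
      | none => d)
    PySem.Dict.empty).items

-- ===== PORT B =====
-- literal port of Source B: flatten keywords.values(); 'for pos, book in enumerate(flat):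
-- first_pos.setdefault(book, pos)' is the foldl of setdefault over PySem.List.enumerate;
-- 'kept' is the filter of the original dict's items by membership in first_pos;
-- kept.sort(key=...) is PySem.List.sorted with key first_pos[item[0]] (getD is exact here:
-- every kept key is in first_pos, where Python's [] returns the stored value); dict(kept)
-- is PySem.Dict.ofList of the sorted pairs, returned as its items.
def limit_id_to_entry_to_review_matches_alt (id_to_book_original : List (String × String)) (keywords : List (String × List String)) : List (String × String) :=
  let orig := PySem.Dict.ofList id_to_book_original
  let flat := (PySem.Dict.ofList keywords).values.flatMap (fun books => books)
  let firstPos := (PySem.List.enumerate flat).foldl (fun d p => d.setdefault p.2 p.1) PySem.Dict.empty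
  let kept := orig.items.filter (fun p => firstPos.contains p.1)
  (PySem.Dict.ofList (PySem.List.sorted kept (fun p => firstPos.getD p.1 0) false)).items

-- ===== PRECONDITION & SPEC =====
def Spec_limit_id_to_entry_to_review_matches (id_to_book_original : List (String × String)) (keywords : List (String × List String)) (out : List (String × String)) : Prop := out = limit_id_to_entry_to_review_matches_alt id_to_book_original keywords
instance (id_to_book_original : List (String × String)) (keywords : List (String × List String)) (out : List (String × String)) : Decidable (Spec_limit_id_to_entry_to_review_matches id_to_book_original keywords out) := by unfold Spec_limit_id_to_entry_to_review_matches; infer_instance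

-- ===== CLAIM (what is proved, stated in full; the proofs are below) =====
def Claim_equal_limit_id_to_entry_to_review_matches : Prop := ∀ (id_to_book_original : List (String × String)) (keywords : List (String × List String)), Dom_limit_id_to_entry_to_review_matches id_to_book_original keywords → Spec_limit_id_to_entry_to_review_matches id_to_book_original keywords (limit_id_to_entry_to_review_matches id_to_book_original keywords)

-- ===== LEMMAS AND PROOFS =====

-- the body of A's inner loop, named for the proofs
def pvStep (orig : PySem.Dict String String) (d : PySem.Dict String String) (book : String) : PySem.Dict String String :=
  if d.contains book then d
  else
    match orig.get? book with
    | some v => d.insert book v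
    | none => d

-- the pairs produced from a candidate list of books
def pvRep (orig : PySem.Dict String String) (cand : List String) : List (String × String) :=
  cand.filterMap (fun book => (orig.get? book).map (fun v => (book, v)))

lemma pvRep_append (orig : PySem.Dict String String) (c₁ c₂ : List String) :
    pvRep orig (c₁ ++ c₂) = pvRep orig c₁ ++ pvRep orig c₂ := by
  simp [pvRep]

lemma pvAny_rep (orig : PySem.Dict String String) (cand : List String) (b : String) :
    ((pvRep orig cand).any fun p => p.1 == b)
      = (decide (b ∈ cand) && (orig.get? b).isSome) := by
  induction cand with
  | nil => simp [pvRep]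
  | cons a t ih =>
    rcases h : orig.get? a with _ | v
    · simp only [pvRep, List.filterMap_cons, h, Option.map_none] at ih ⊢
      rw [ih]
      by_cases hb : b = a
      · subst hb; simp [h]
      · simp [hb]
    · simp only [pvRep, List.filterMap_cons, h, Option.map_some, List.any_cons] at ih ⊢
      rw [ih]
      by_cases hb : b = a
      · subst hb; simp [h]
      · simp [hb, Ne.symm hb]

lemma pvContains_rep (orig : PySem.Dict String String) (cand : List String) (b : String) :
    (PySem.Dict.mk (pvRep orig cand)).contains b
      = (decide (b ∈ cand) && (orig.get? b).isSome) := by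
  rw [PySem.Dict.contains_mk, pvAny_rep]

-- loop invariant: running A's inner step over 'flat' from the dict representing the
-- candidate list 'cand' yields the dict representing cand updated (deduplicated) with flat
lemma pvInv (orig : PySem.Dict String String) (flat : List String) (cand : List String) :
    flat.foldl (pvStep orig) (PySem.Dict.mk (pvRep orig cand))
      = PySem.Dict.mk (pvRep orig (PySem.Set.update cand flat)) := by
  induction flat generalizing cand with
  | nil => simp [PySem.Set.update]
  | cons b rest ih =>
    rw [List.foldl_cons, PySem.Set.update_cons]
    have hstep : pvStep orig (PySem.Dict.mk (pvRep orig cand)) b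
        = PySem.Dict.mk (pvRep orig (PySem.Set.add cand b)) := by
      unfold pvStep
      rw [pvContains_rep]
      rcases hg : orig.get? b with _ | v
      · simp only [Option.isSome_none, Bool.and_false, Bool.false_eq_true, if_false]
        by_cases hb : b ∈ cand
        · rw [PySem.Set.add_of_mem hb]
        · rw [PySem.Set.add_of_not_mem hb, pvRep_append]
          simp [pvRep, hg]
      · simp only [Option.isSome_some, Bool.and_true]
        by_cases hb : b ∈ cand
        · rw [PySem.Set.add_of_mem hb]; simp [hb]
        · have hnc : (PySem.Dict.mk (pvRep orig cand)).contains b = false := by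
            rw [pvContains_rep]; simp [hg, hb]
          simp only [hb, decide_false, Bool.false_eq_true, if_false]
          apply PySem.Dict.ext
          rw [PySem.Dict.items_insert_of_not_contains _ _ hnc,
              PySem.Set.add_of_not_mem hb, pvRep_append]
          simp [pvRep, hg]
    rw [hstep, ih]

-- a fold of inner folds over the items is the single fold over the flattened value lists
lemma pvFoldFold (orig : PySem.Dict String String)
    (its : List (String × List String)) (d : PySem.Dict String String) :
    its.foldl (fun d p => p.2.foldl (pvStep orig) d) d
      = (its.flatMap Prod.snd).foldl (pvStep orig) d := by
  induction its generalizing d with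
  | nil => rfl
  | cons p t ih => simp [List.flatMap_cons, List.foldl_append, ih]

-- A, over any pair of already-built dicts with unique keyword keys, is pvRep of the
-- deduplicated flattened candidate stream
lemma pvMainA (orig : PySem.Dict String String) (kw : PySem.Dict String (List String))
    (hk : kw.keys.Nodup) :
    (kw.keys.foldl (fun d word =>
        match kw.get? word with
        | some books => books.foldl (pvStep orig) d
        | none => d) PySem.Dict.empty).items
      = pvRep orig (PySem.List.dedup (kw.values.flatMap (fun books => books))) := by
  have h1 : kw.keys.foldl (fun d word =>
        match kw.get? word with
        | some books => books.foldl (pvStep orig) d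
        | none => d) PySem.Dict.empty
      = (kw.items.flatMap Prod.snd).foldl (pvStep orig) PySem.Dict.empty := by
    have hkeys : kw.keys = kw.items.map Prod.fst := rfl
    rw [hkeys, List.foldl_map]
    rw [PySem.List.foldl_congr_mem' _ _ (fun d p => p.2.foldl (pvStep orig) d) _
      (by
        intro p hp acc
        have := PySem.Dict.get?_of_mem_items kw (k := p.1) (v := p.2)
          (by simpa using hp) hk
        simp [this])]
    exact pvFoldFold orig kw.items PySem.Dict.empty
  rw [h1]
  have h2 : PySem.Dict.empty = PySem.Dict.mk (pvRep orig ([] : List String)) := rfl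
  rw [h2, pvInv]
  have hvals : kw.values.flatMap (fun books => books) = kw.items.flatMap Prod.snd := by
    show (kw.items.map Prod.snd).flatMap (fun books => books) = _
    exact List.flatMap_map Prod.snd (fun books => books) kw.items
  rw [hvals, PySem.List.dedup_eq_ofList, PySem.Set.ofList_eq_foldl]
  rfl

-- B's first-occurrence dict, characterised: get? is the start offset plus the index of
-- the first occurrence (setdefault keeps an existing entry)
lemma pvFP (flat : List String) (s : Int) (d : PySem.Dict String Int) (b : String) :
    ((PySem.List.enumerate flat s).foldl (fun d p => d.setdefault p.2 p.1) d).get? b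
      = (d.get? b).or (if b ∈ flat then some (s + List.idxOf b flat) else none) := by
  induction flat generalizing s d with
  | nil =>
    rw [PySem.List.enumerate_nil, List.foldl_nil]
    cases d.get? b <;> simp [Option.or]
  | cons a t ih =>
    rw [PySem.List.enumerate_cons, List.foldl_cons, ih]
    by_cases hb : b = a
    · subst hb
      rw [PySem.Dict.get?_setdefault_self]
      rcases hd : d.get? b with _ | v
      · simp [Option.or, List.idxOf_cons_self]
      · simp [Option.or]
    · rw [PySem.Dict.get?_setdefault_of_ne _ _ hb]
      congr 1
      by_cases hm : b ∈ t
      · rw [List.idxOf_cons_ne _ (Ne.symm hb)]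
        simp only [hm, if_true, List.mem_cons, hb, false_or]
        congr 1
        push_cast
        ring
      · have : b ∉ a :: t := by simp [hb, hm]
        simp [hm, this]

lemma pvFP_get (flat : List String) (b : String) (hb : b ∈ flat) :
    ((PySem.List.enumerate flat (0 : Int)).foldl (fun d p => d.setdefault p.2 p.1)
        PySem.Dict.empty).get? b = some (List.idxOf b flat) := by
  rw [pvFP]
  simp [PySem.Dict.get?_empty, Option.or, hb]

lemma pvFP_contains (flat : List String) (b : String) :
    ((PySem.List.enumerate flat (0 : Int)).foldl (fun d p => d.setdefault p.2 p.1)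
        PySem.Dict.empty).contains b = decide (b ∈ flat) := by
  rw [PySem.Dict.contains_eq_isSome_get?, pvFP]
  by_cases hb : b ∈ flat <;> simp [PySem.Dict.get?_empty, Option.or, hb]

-- the deduplicated stream is strictly increasing in first-occurrence index
lemma pvDedup_pairwise (flat : List String) :
    (PySem.List.dedup flat).Pairwise (fun a b => List.idxOf a flat < List.idxOf b flat) := by
  induction flat with
  | nil => simp [PySem.List.dedup_eq_ofList, PySem.Set.ofList_nil]
  | cons x t ih =>
    rw [PySem.List.dedup_eq_ofList, PySem.Set.ofList_cons]
    rw [PySem.List.dedup_eq_ofList] at ih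
    constructor
    · intro b hb
      have hbne : b ≠ x := ((PySem.Set.mem_discard _ _ _).1 hb).2
      rw [List.idxOf_cons_self, List.idxOf_cons_ne _ (Ne.symm hbne)]
      omega
    · have hd : PySem.Set.discard (PySem.Set.ofList t) x
          = (PySem.Set.ofList t).filter (fun y => !(y == x)) := rfl
      rw [hd]
      refine List.Pairwise.imp_of_mem ?_ (List.Pairwise.filter _ ih)
      intro a b ha hb hlt
      have hane : a ≠ x := by simpa using (List.of_mem_filter ha)
      have hbne : b ≠ x := by simpa using (List.of_mem_filter hb)
      rw [List.idxOf_cons_ne _ (Ne.symm hane), List.idxOf_cons_ne _ (Ne.symm hbne)]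
      omega

-- membership in pvRep, spelt out
lemma pvMem_rep (orig : PySem.Dict String String) (flat : List String) (p : String × String) :
    p ∈ pvRep orig (PySem.List.dedup flat) ↔ p.1 ∈ flat ∧ orig.get? p.1 = some p.2 := by
  constructor
  · intro hp
    rcases List.mem_filterMap.1 hp with ⟨b, hb, hf⟩
    rcases hg : orig.get? b with _ | v
    · simp [hg] at hf
    · simp only [hg, Option.map_some, Option.some.injEq] at hf
      subst hf
      exact ⟨(PySem.List.mem_dedup _ _).1 hb, hg⟩
  · rintro ⟨h1, h2⟩
    exact List.mem_filterMap.2 ⟨p.1, (PySem.List.mem_dedup _ _).2 h1, by simp [h2]⟩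

-- the keys of pvRep are the candidates that the original dict contains
lemma pvRep_map_fst (orig : PySem.Dict String String) (cand : List String) :
    (pvRep orig cand).map Prod.fst = cand.filter (fun b => (orig.get? b).isSome) := by
  induction cand with
  | nil => rfl
  | cons a t ih =>
    rcases hg : orig.get? a with _ | v
    · simp [pvRep, hg] at ih ⊢
      exact ih
    · simp [pvRep, hg] at ih ⊢
      exact ih

-- ===== VERDICT (by name: the statement is the Claim_ definition above) =====
theorem limit_id_to_entry_to_review_matches_spec : Claim_equal_limit_id_to_entry_to_review_matches := by
  intro idl kwl _
  show limit_id_to_entry_to_review_matches idl kwl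
      = limit_id_to_entry_to_review_matches_alt idl kwl
  have horig : (PySem.Dict.ofList idl).keys.Nodup := PySem.Dict.nodup_keys_ofList idl
  set orig := PySem.Dict.ofList idl with horigdef
  set flat := (PySem.Dict.ofList kwl).values.flatMap (fun books => books) with hflatdef
  set fp := (PySem.List.enumerate flat (0 : Int)).foldl (fun d p => d.setdefault p.2 p.1)
      PySem.Dict.empty with hfpdef
  set kept := orig.items.filter (fun p => fp.contains p.1) with hkeptdef
  set rep := pvRep orig (PySem.List.dedup flat) with hrepdef
  -- the sort key on a pair whose first component is in flat is the first-occurrence index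
  have hkey : ∀ p : String × String, p.1 ∈ flat →
      fp.getD p.1 0 = (List.idxOf p.1 flat : Int) := by
    intro p hp
    rw [PySem.Dict.getD_eq_get?_getD, pvFP_get flat p.1 hp]
    rfl
  -- rep is pairwise strictly increasing under the sort key
  have hpair : rep.Pairwise (fun p q => fp.getD p.1 0 < fp.getD q.1 0) := by
    have h0 := pvDedup_pairwise flat
    have h1 : (PySem.List.dedup flat).Pairwise
        (fun a b => a ∈ flat ∧ b ∈ flat ∧ List.idxOf a flat < List.idxOf b flat) := by
      refine List.Pairwise.imp_of_mem ?_ h0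
      intro a b ha hb hlt
      exact ⟨(PySem.List.mem_dedup _ _).1 ha, (PySem.List.mem_dedup _ _).1 hb, hlt⟩
    rw [hrepdef]
    unfold pvRep
    rw [List.pairwise_filterMap]
    refine h1.imp ?_
    rintro a b ⟨haf, hbf, hlt⟩ x hx y hy
    rcases hga : orig.get? a with _ | v <;> rw [hga] at hx
    · simp at hx
    rcases hgb : orig.get? b with _ | w <;> rw [hgb] at hy
    · simp at hy
    simp only [Option.map_some, Option.some.injEq] at hx hy
    subst hx; subst hy
    rw [hkey (a, v) haf, hkey (b, w) hbf]
    exact_mod_cast hlt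
  -- rep has no duplicate entries
  have hnodup_rep : rep.Nodup := by
    refine hpair.imp ?_
    intro p q hlt he
    rw [he] at hlt
    exact lt_irrefl _ hlt
  -- kept has no duplicate entries
  have hnodup_kept : kept.Nodup := by
    apply List.Nodup.filter
    exact horig.of_map
  -- rep and kept have the same members
  have hmem : ∀ p : String × String, p ∈ rep ↔ p ∈ kept := by
    intro p
    rw [hrepdef, pvMem_rep, hkeptdef, List.mem_filter]
    constructor
    · rintro ⟨h1, h2⟩
      refine ⟨(PySem.Dict.get?_eq_some_iff_mem_items orig p.1 p.2 horig).1 h2, ?_⟩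
      rw [pvFP_contains]
      simpa using h1
    · rintro ⟨h1, h2⟩
      rw [pvFP_contains] at h2
      exact ⟨by simpa using h2, (PySem.Dict.get?_eq_some_iff_mem_items orig p.1 p.2 horig).2 h1⟩
  have hperm : rep.Perm kept :=
    (List.perm_ext_iff_of_nodup hnodup_rep hnodup_kept).2 hmem
  -- naming Python's sort: the unique strictly key-increasing rearrangement
  have hsorted : PySem.List.sorted kept (fun p => fp.getD p.1 0) false = rep :=
    PySem.List.sorted_eq_of_perm_of_pairwise_lt _ _ _ hperm hpair
  -- dict() of pairs with distinct keys keeps them as they are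
  have hfst : (rep.map Prod.fst).Nodup := by
    rw [hrepdef, pvRep_map_fst]
    exact (PySem.List.nodup_dedup flat).filter _
  have hitems : (PySem.Dict.ofList rep).items = rep := by
    have h := PySem.Dict.items_foldl_insert_fresh rep Prod.fst Prod.snd PySem.Dict.empty
      (by intro a _; exact PySem.Dict.contains_empty a.1) hfst
    simpa using h
  calc limit_id_to_entry_to_review_matches idl kwl
      = rep := by
        rw [hrepdef, horigdef, hflatdef]
        exact pvMainA _ _ (PySem.Dict.nodup_keys_ofList kwl)
    _ = (PySem.Dict.ofList (PySem.List.sorted kept (fun p => fp.getD p.1 0) false)).items := by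
        rw [hsorted, hitems]
    _ = limit_id_to_entry_to_review_matches_alt idl kwl := rfl
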